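-- pv_equiv track=rewrite | github.com/eitam1995/eitam | wave_editor.py | dimming
-- ===== SOURCE A (Python) =====
-- def dimming(music_list):
--     newlst=[]
--     for i in range(len(music_list)):
--         if i>0 and i+1<len(music_list):
--             x = int((music_list[i-1][0]+music_list[i][0]+music_list[i+1][0])/3)
--             y = int((music_list[i-1][1]+music_list[i][1]+music_list[i+1][1])/3)
--         elif i==0:
--             x = int((music_list[i][0] +
--                      music_list[i + 1][0]) / 2)
--             y = int((music_list[i][1] +
--                      music_list[i + 1][1]) / 2)
--         elif i+1==len(music_list):
--             x = int((music_list[i][0] +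
--                      music_list[i - 1][0]) / 2)
--             y = int((music_list[i][1] +
--                      music_list[i - 1][1]) / 2)
--         newlst.append([x,y])
--     return newlst
-- ===== SOURCE B (Python) =====
-- def dimming(music_list):
--     n = len(music_list)
--     px = [0]
--     py = [0]
--     for x, y in music_list:
--         px.append(px[-1] + x)
--         py.append(py[-1] + y)
--     out = []
--     for i in range(n):
--         lo = max(i - 1, 0)
--         hi = min(i + 2, n)
--         k = hi - lo
--         out.append([int((px[hi] - px[lo]) / k), int((py[hi] - py[lo]) / k)])
--     return out
-- ===== Notes on version B (the rewrite author's own statement) =====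
-- stated objective: alternative
-- what changed: B builds prefix-sum arrays of the x and y coordinates in a first pass and then computes each smoothed point as a window-sum difference px[hi]-px[lo] over [max(i-1,0), min(i+2,n)) divided by the window length, replacing A's three-way positional branching on neighbor indices.
import Mathlib
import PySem

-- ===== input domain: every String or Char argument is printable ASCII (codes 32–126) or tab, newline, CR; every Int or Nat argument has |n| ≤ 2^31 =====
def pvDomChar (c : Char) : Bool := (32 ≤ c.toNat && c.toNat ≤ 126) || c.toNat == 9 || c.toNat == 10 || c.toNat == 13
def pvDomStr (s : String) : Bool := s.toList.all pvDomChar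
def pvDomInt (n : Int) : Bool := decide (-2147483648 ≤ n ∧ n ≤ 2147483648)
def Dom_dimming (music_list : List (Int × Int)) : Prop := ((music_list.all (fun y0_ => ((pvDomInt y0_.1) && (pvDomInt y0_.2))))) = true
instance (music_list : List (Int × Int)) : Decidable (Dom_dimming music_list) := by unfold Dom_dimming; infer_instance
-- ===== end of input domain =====

-- B replaces A's three-way positional branching by a prefix-sum pass plus window-sum
-- differences (objective: alternative, same O(n) cost; return values identical on Pre_).

-- ===== PORT A =====
-- Python's int((a+b)/2) / int((a+b+c)/3) is float division then truncation; on Dom the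
-- operands satisfy |sum| ≤ 3·2^31 < 2^53, where PySem.Int.truncdiv is exact.
-- In-range indexing music_list[i±1] (guaranteed by the branch guards on Pre_) is ported with getD.
def dimming (music_list : List (Int × Int)) : List (List Int) :=
  (List.range music_list.length).foldl
    (fun newlst i =>
      let n := music_list.length
      let xy : List Int :=
        if 0 < i ∧ i + 1 < n then
          [PySem.Int.truncdiv ((music_list.getD (i-1) (0,0)).1 + (music_list.getD i (0,0)).1 + (music_list.getD (i+1) (0,0)).1) 3,
           PySem.Int.truncdiv ((music_list.getD (i-1) (0,0)).2 + (music_list.getD i (0,0)).2 + (music_list.getD (i+1) (0,0)).2) 3]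
        else if i = 0 then
          [PySem.Int.truncdiv ((music_list.getD i (0,0)).1 + (music_list.getD (i+1) (0,0)).1) 2,
           PySem.Int.truncdiv ((music_list.getD i (0,0)).2 + (music_list.getD (i+1) (0,0)).2) 2]
        else if i + 1 = n then
          [PySem.Int.truncdiv ((music_list.getD i (0,0)).1 + (music_list.getD (i-1) (0,0)).1) 2,
           PySem.Int.truncdiv ((music_list.getD i (0,0)).2 + (music_list.getD (i-1) (0,0)).2) 2]
        else []  -- unreachable for i ∈ range n (Python would hit unbound x,y here)
      newlst ++ [xy])
    []

-- ===== PORT B =====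
-- the prefix-sum list [0, l[0], l[0]+l[1], …] B builds in its first loop
def pvPrefix : Int → List Int → List Int
  | s, [] => [s]
  | s, a :: r => s :: pvPrefix (s + a) r

def dimming_alt (music_list : List (Int × Int)) : List (List Int) :=
  let n := music_list.length
  let px := pvPrefix 0 (music_list.map Prod.fst)
  let py := pvPrefix 0 (music_list.map Prod.snd)
  (List.range n).map (fun i =>
    let lo := i - 1            -- Nat subtraction = Python's max(i-1, 0)
    let hi := min (i + 2) n
    let k := hi - lo
    [PySem.Int.truncdiv (px.getD hi 0 - px.getD lo 0) (k : Int),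
     PySem.Int.truncdiv (py.getD hi 0 - py.getD lo 0) (k : Int)])

-- ===== PRECONDITION & SPEC =====
-- Pre_ excludes exactly the length-1 lists, on which A raises IndexError (it reads music_list[1]).
def Pre_dimming (music_list : List (Int × Int)) : Prop := music_list.length ≠ 1
instance (music_list : List (Int × Int)) : Decidable (Pre_dimming music_list) := by
  unfold Pre_dimming; infer_instance
def pvWitness_dimming : (List (Int × Int)) := [(1, 2), (3, 4), (-5, 7)]

def Spec_dimming (music_list : List (Int × Int)) (out : List (List Int)) : Prop := out = dimming_alt music_list
instance (music_list : List (Int × Int)) (out : List (List Int)) : Decidable (Spec_dimming music_list out) := by unfold Spec_dimming; infer_instance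

-- ===== CLAIM (what is proved, stated in full; the proofs are below) =====
def Claim_equal_dimming : Prop := ∀ (music_list : List (Int × Int)), Dom_dimming music_list → Pre_dimming music_list → Spec_dimming music_list (dimming music_list)

-- ===== LEMMAS AND PROOFS =====

-- the per-index body of A's loop
def pvF (l : List (Int × Int)) (i : Nat) : List Int :=
  if 0 < i ∧ i + 1 < l.length then
    [PySem.Int.truncdiv ((l.getD (i-1) (0,0)).1 + (l.getD i (0,0)).1 + (l.getD (i+1) (0,0)).1) 3,
     PySem.Int.truncdiv ((l.getD (i-1) (0,0)).2 + (l.getD i (0,0)).2 + (l.getD (i+1) (0,0)).2) 3]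
  else if i = 0 then
    [PySem.Int.truncdiv ((l.getD i (0,0)).1 + (l.getD (i+1) (0,0)).1) 2,
     PySem.Int.truncdiv ((l.getD i (0,0)).2 + (l.getD (i+1) (0,0)).2) 2]
  else if i + 1 = l.length then
    [PySem.Int.truncdiv ((l.getD i (0,0)).1 + (l.getD (i-1) (0,0)).1) 2,
     PySem.Int.truncdiv ((l.getD i (0,0)).2 + (l.getD (i-1) (0,0)).2) 2]
  else []

theorem dimming_eq_map (l : List (Int × Int)) :
    dimming l = (List.range l.length).map (pvF l) := by
  unfold dimming
  rw [PySem.List.foldl_append_singleton_eq_map]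
  simp [pvF]

-- the prefix-sum list B builds: its j-th entry is s plus the sum of the first j elements
theorem pvPrefix_getD : ∀ (xs : List Int) (s : Int) (j : Nat), j ≤ xs.length →
    (pvPrefix s xs).getD j 0 = s + (xs.take j).sum
  | [], s, 0, _ => by simp [pvPrefix]
  | [], s, j+1, h => by simp at h
  | a :: r, s, 0, _ => by simp [pvPrefix]
  | a :: r, s, j+1, h => by
    have ih := pvPrefix_getD r (s + a) j (by simpa using h)
    simp only [pvPrefix, List.getD_cons_succ, List.take_succ_cons, List.sum_cons]
    rw [ih]; ring

theorem take_sum_step (xs : List Int) (j : Nat) (h : j < xs.length) :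
    (xs.take (j+1)).sum = (xs.take j).sum + xs.getD j 0 := by
  rw [List.sum_take_succ xs j h, List.getD_eq_getElem xs 0 h]

-- difference of prefix sums over a 2-element window
theorem pvWin2 (xs : List Int) (lo : Nat) (h : lo + 2 ≤ xs.length) :
    (pvPrefix 0 xs).getD (lo+2) 0 - (pvPrefix 0 xs).getD lo 0
      = xs.getD lo 0 + xs.getD (lo+1) 0 := by
  rw [pvPrefix_getD xs 0 (lo+2) h, pvPrefix_getD xs 0 lo (by omega),
      take_sum_step xs (lo+1) (by omega), take_sum_step xs lo (by omega)]
  ring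

-- difference of prefix sums over a 3-element window
theorem pvWin3 (xs : List Int) (lo : Nat) (h : lo + 3 ≤ xs.length) :
    (pvPrefix 0 xs).getD (lo+3) 0 - (pvPrefix 0 xs).getD lo 0
      = xs.getD lo 0 + xs.getD (lo+1) 0 + xs.getD (lo+2) 0 := by
  rw [pvPrefix_getD xs 0 (lo+3) h, pvPrefix_getD xs 0 lo (by omega),
      take_sum_step xs (lo+2) (by omega), take_sum_step xs (lo+1) (by omega),
      take_sum_step xs lo (by omega)]
  ring

theorem getD_map_fst (l : List (Int × Int)) (i : Nat) (h : i < l.length) :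
    (l.map Prod.fst).getD i 0 = (l.getD i (0,0)).1 := by
  simp [List.getD, List.getElem?_map, List.getElem?_eq_getElem h]

theorem getD_map_snd (l : List (Int × Int)) (i : Nat) (h : i < l.length) :
    (l.map Prod.snd).getD i 0 = (l.getD i (0,0)).2 := by
  simp [List.getD, List.getElem?_map, List.getElem?_eq_getElem h]

theorem dimming_spec : Claim_equal_dimming := by
  intro l _ hpre
  unfold Spec_dimming dimming_alt
  rw [dimming_eq_map]
  apply List.map_congr_left
  intro i hi
  have hin : i < l.length := List.mem_range.mp hi
  have hn1 : l.length ≠ 1 := hpre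
  simp only []
  by_cases hmid : 0 < i ∧ i + 1 < l.length
  · -- interior: lo = i-1, window [i-1, i+2), k = 3
    have e : min (i + 2) l.length = (i-1) + 3 := by omega
    have hk : (((i-1) + 3 - (i-1) : Nat) : Int) = 3 := by omega
    have wx := pvWin3 (l.map Prod.fst) (i-1) (by simp; omega)
    have wy := pvWin3 (l.map Prod.snd) (i-1) (by simp; omega)
    rw [getD_map_fst l (i-1) (by omega), show i-1+1 = i by omega,
        getD_map_fst l i (by omega), show i-1+2 = i+1 by omega,
        getD_map_fst l (i+1) (by omega)] at wx
    rw [getD_map_snd l (i-1) (by omega), show i-1+1 = i by omega,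
        getD_map_snd l i (by omega), show i-1+2 = i+1 by omega,
        getD_map_snd l (i+1) (by omega)] at wy
    rw [e, hk, wx, wy]
    simp only [pvF, if_pos hmid]
  · by_cases h0 : i = 0
    · -- first element: window [0, 2), k = 2 (l.length ≥ 2 by Pre_)
      subst h0
      have e : min (0 + 2) l.length = 0 + 2 := by omega
      have hk : ((0 + 2 - (0-1) : Nat) : Int) = 2 := by omega
      have wx := pvWin2 (l.map Prod.fst) 0 (by simp; omega)
      have wy := pvWin2 (l.map Prod.snd) 0 (by simp; omega)
      rw [getD_map_fst l 0 (by omega), getD_map_fst l (0+1) (by omega)] at wx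
      rw [getD_map_snd l 0 (by omega), getD_map_snd l (0+1) (by omega)] at wy
      rw [e, show (0:Nat) - 1 = 0 from rfl] at *
      rw [hk, wx, wy]
      simp [pvF]
    · -- last element: i + 1 = l.length, window [i-1, l.length), k = 2
      have hlast : i + 1 = l.length := by omega
      have e : min (i + 2) l.length = (i-1) + 2 := by omega
      have hk : (((i-1) + 2 - (i-1) : Nat) : Int) = 2 := by omega
      have wx := pvWin2 (l.map Prod.fst) (i-1) (by simp; omega)
      have wy := pvWin2 (l.map Prod.snd) (i-1) (by simp; omega)
      rw [getD_map_fst l (i-1) (by omega), show i-1+1 = i by omega,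
          getD_map_fst l i (by omega)] at wx
      rw [getD_map_snd l (i-1) (by omega), show i-1+1 = i by omega,
          getD_map_snd l i (by omega)] at wy
      rw [e, hk, wx, wy]
      simp only [pvF, if_neg hmid, if_neg h0, if_pos hlast]
      rw [Int.add_comm ((l.getD i (0,0)).1), Int.add_comm ((l.getD i (0,0)).2)]
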